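-- pv_equiv track=rewrite | github.com/teabolt/dcu_eng_comp_projects_dataset | src/projects_parser.py | lines_to_projects
-- ===== SOURCE A (Python) =====
-- def lines_to_projects(lines):
--     """
--     Given a list of lines,
--     return a list of lines where each line is all project's lines combined.
--     """
--     project_title_indices = [i for i, line in enumerate(
--         lines) if "Project Title" in line]
--     projects_strings = []
--     i = 1
--     while i < len(project_title_indices):
--         projects_strings.append(
--             "".join(lines[project_title_indices[i-1]:project_title_indices[i]]))
--         i += 1
--     projects_strings.append("".join(lines[project_title_indices[-1]:]))
--     return projects_strings
-- ===== SOURCE B (Python) =====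
-- def lines_to_projects(lines):
--     projects = []
--     current = None
--     for line in lines:
--         if "Project Title" in line:
--             if current is not None:
--                 projects.append("".join(current))
--             current = [line]
--         elif current is not None:
--             current.append(line)
--     if current is None:
--         return []
--     projects.append("".join(current))
--     return projects
-- ===== Notes on version B (the rewrite author's own statement) =====
-- stated objective: simpler
-- what changed: One streaming pass that maintains the current project's lines and flushes it at each 'Project Title' marker, replacing A's enumerate-built index list plus while-loop slicing.
-- outside the precondition, e.g. on lines_to_projects([]): A raises IndexError, B returns []
import Mathlib
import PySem

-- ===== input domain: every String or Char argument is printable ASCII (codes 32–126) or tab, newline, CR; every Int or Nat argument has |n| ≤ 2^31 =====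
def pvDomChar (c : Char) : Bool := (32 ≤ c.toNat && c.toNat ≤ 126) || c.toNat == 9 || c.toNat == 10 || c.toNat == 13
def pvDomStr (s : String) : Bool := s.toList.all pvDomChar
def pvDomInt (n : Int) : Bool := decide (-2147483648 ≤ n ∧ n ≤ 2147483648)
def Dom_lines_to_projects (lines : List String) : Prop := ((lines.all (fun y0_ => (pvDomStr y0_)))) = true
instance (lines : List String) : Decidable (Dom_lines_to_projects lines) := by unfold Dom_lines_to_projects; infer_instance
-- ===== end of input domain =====

-- B replaces A's marker-index list + while-loop slicing with one streaming pass that flushes the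
-- current group at each "Project Title" marker (objective: simpler); where A raises IndexError
-- (no marker in any line), B returns [].

-- line contains the marker substring "Project Title" (used by both ports)
def pvMark (l : String) : Bool := PySem.Str.isIn "Project Title" l

-- ===== PORT A =====
-- the while loop: i counts up while i < len(indices), appending "".join(lines[indices[i-1]:indices[i]])

def pvAwhile (lines : List String) (idxs : List Int) (i : Nat) (acc : List String) : List String :=
  if h : i < idxs.length then
    pvAwhile lines idxs (i + 1)
      (acc ++ [PySem.Str.join "" (PySem.List.slice lines (some (idxs.getD (i - 1) 0)) (some (idxs.getD i 0)))])
  else acc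
termination_by idxs.length - i

def lines_to_projects (lines : List String) : List String :=
  let idxs := (PySem.List.enumerate lines 0).filterMap (fun il => if pvMark il.2 then some il.1 else none)
  match PySem.List.pyGet? idxs (-1) with
  | none => []
  | some last => pvAwhile lines idxs 1 [] ++ [PySem.Str.join "" (PySem.List.slice lines (some last) none)]


-- ===== PORT B =====

def pvBStep (st : List String × Option (List String)) (line : String) : List String × Option (List String) :=
  if pvMark line then
    match st.2 with
    | none => (st.1, some [line])
    | some c => (st.1 ++ [PySem.Str.join "" c], some [line])
  else
    match st.2 with
    | none => st
    | some c => (st.1, some (c ++ [line]))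

def lines_to_projects_alt (lines : List String) : List String :=
  match lines.foldl pvBStep ([], none) with
  | (_, none) => []
  | (acc, some c) => acc ++ [PySem.Str.join "" c]


-- ===== PRECONDITION & SPEC =====
-- Pre_ excludes exactly the inputs on which A raises (IndexError from indices[-1] on an empty index
-- list): those with no line containing "Project Title"; B returns [] there.
def Pre_lines_to_projects (lines : List String) : Prop := ∃ l ∈ lines, pvMark l = true
instance (lines : List String) : Decidable (Pre_lines_to_projects lines) := by unfold Pre_lines_to_projects; infer_instance
def pvWitness_lines_to_projects : List String := ["Project Title: Foo", "body line", "Project Title: Bar", "more"]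

def Spec_lines_to_projects (lines : List String) (out : List String) : Prop := out = lines_to_projects_alt lines
instance (lines : List String) (out : List String) : Decidable (Spec_lines_to_projects lines out) := by unfold Spec_lines_to_projects; infer_instance

-- ===== CLAIM (what is proved, stated in full; the proofs are below) =====
def Claim_equal_lines_to_projects : Prop := ∀ (lines : List String), Dom_lines_to_projects lines → Pre_lines_to_projects lines → Spec_lines_to_projects lines (lines_to_projects lines)

-- ===== LEMMAS AND PROOFS =====

-- positions (0-based) of the marker lines

def pvIdxs : List String → List Nat
  | [] => []
  | l :: ls => (if pvMark l then [0] else []) ++ (pvIdxs ls).map (· + 1)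


-- A's segment builder, recursing on the remaining marker positions

def pvF (lines : List String) (p : Nat) : List Nat → List String
  | [] => [PySem.Str.join "" (lines.drop p)]
  | j :: rest => PySem.Str.join "" ((lines.drop p).take (j - p)) :: pvF lines j rest


-- B's streaming grouper, once inside the first group

def pvGrp (cur : List String) : List String → List String
  | [] => [PySem.Str.join "" cur]
  | l :: ls => if pvMark l then PySem.Str.join "" cur :: pvGrp [l] ls else pvGrp (cur ++ [l]) ls

def pvFinish (st : List String × Option (List String)) : List String :=
  match st with
  | (_, none) => []
  | (acc, some c) => acc ++ [PySem.Str.join "" c]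

theorem pvIdxs_char (ls : List String) : ∀ (s : Int),
    (PySem.List.enumerate ls s).filterMap (fun il => if pvMark il.2 then some il.1 else none)
      = (pvIdxs ls).map (fun k : Nat => s + (k : Int)) := by
  induction ls with
  | nil => intro s; simp [PySem.List.enumerate_nil, pvIdxs]
  | cons l ls ih =>
    intro s
    rw [PySem.List.enumerate_cons, List.filterMap_cons]
    by_cases hm : pvMark l <;>
      · simp only [hm, if_true, if_false, pvIdxs, ih (s + 1), List.map_append, List.map_map,
          List.map_cons, List.map_nil, List.nil_append, List.cons_append, Nat.cast_zero, add_zero]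
        first
        | (refine List.map_congr_left fun k _ => ?_)
        | (refine congrArg₂ _ rfl (List.map_congr_left fun k _ => ?_))
        simp only [Function.comp_apply]
        push_cast; ring

theorem pvF_shift (l : String) (ls : List String) : ∀ (idxs : List Nat) (p : Nat),
    pvF (l :: ls) (p + 1) (idxs.map (· + 1)) = pvF ls p idxs := by
  intro idxs
  induction idxs with
  | nil => intro p; simp [pvF]
  | cons j rest ih => intro p; simp [pvF, ih]

theorem pvIdxs_nil_iff (ls : List String) : pvIdxs ls = [] ↔ ∀ l ∈ ls, pvMark l = false := by
  induction ls with
  | nil => simp [pvIdxs]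
  | cons l ls ih =>
    by_cases hm : pvMark l <;> simp [pvIdxs, hm, ih]

theorem pvC (lines : List String) : ∀ (ls cur : List String) (p : Nat),
    lines.drop p = cur ++ ls →
    pvGrp cur ls = pvF lines p ((pvIdxs ls).map (· + (p + cur.length))) := by
  intro ls
  induction ls with
  | nil => intro cur p h; simp [pvIdxs, pvF, pvGrp, h]
  | cons l ls ih =>
    intro cur p h
    by_cases hm : pvMark l
    · have hq : lines.drop (p + cur.length) = l :: ls := by
        rw [← List.drop_drop, h]; simp
      simp only [pvGrp, hm, if_true, pvIdxs, List.map_append, List.map_map, List.map_cons,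
        List.map_nil, List.cons_append, List.nil_append, Nat.zero_add, pvF]
      have hmap : List.map ((fun x => x + (p + cur.length)) ∘ fun x => x + 1) (pvIdxs ls)
          = List.map (fun x => x + (p + cur.length + [l].length)) (pvIdxs ls) :=
        List.map_congr_left fun k _ => by simp only [Function.comp_apply, List.length_cons, List.length_nil]; omega
      rw [hmap]
      have h1 : PySem.Str.join "" cur
          = PySem.Str.join "" ((lines.drop p).take (p + cur.length - p)) := by rw [h]; simp
      have h2 : pvGrp [l] ls
          = pvF lines (p + cur.length) (List.map (fun x => x + (p + cur.length + [l].length)) (pvIdxs ls)) := by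
        rw [ih [l] (p + cur.length) (by simpa using hq)]
      rw [h2]
      exact congrArg₂ _ h1 rfl
    · simp only [pvGrp, hm, if_false, pvIdxs, List.map_map, Bool.false_eq_true, List.nil_append]
      rw [ih (cur ++ [l]) p (by rw [h]; simp)]
      refine congrArg _ (List.map_congr_left fun k _ => ?_)
      simp only [Function.comp_apply, List.length_append, List.length_cons, List.length_nil]
      omega

theorem pvAwhile_shift (lines : List String) (idxs : List Int) (x : Int) :
    ∀ (n i : Nat) (acc : List String), idxs.length - i ≤ n → 1 ≤ i →
      pvAwhile lines (x :: idxs) (i + 1) acc = pvAwhile lines idxs i acc := by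
  intro n
  induction n with
  | zero =>
    intro i acc hn hi
    rw [pvAwhile, dif_neg (by simp only [List.length_cons]; omega)]
    rw [pvAwhile, dif_neg (by omega)]
  | succ n ih =>
    intro i acc hn hi
    by_cases h : i < idxs.length
    · rw [pvAwhile, dif_pos (by simp only [List.length_cons]; omega)]
      obtain ⟨j, rfl⟩ : ∃ j, i = j + 1 := ⟨i - 1, by omega⟩
      have e1 : (x :: idxs).getD (j + 1 + 1 - 1) 0 = idxs.getD (j + 1 - 1) 0 := by simp
      have e2 : (x :: idxs).getD (j + 1 + 1) 0 = idxs.getD (j + 1) 0 := by simp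
      rw [e1, e2, ih (j + 1 + 1) _ (by omega) (by omega)]
      conv_rhs => rw [pvAwhile]
      rw [dif_pos h]
    · rw [pvAwhile, dif_neg (by simp only [List.length_cons]; omega)]
      rw [pvAwhile, dif_neg h]

theorem pvBridge (lines : List String) : ∀ (idxs : List Nat) (p : Nat) (acc : List String),
    pvAwhile lines ((p :: idxs).map (fun k : Nat => (k : Int))) 1 acc
      ++ [PySem.Str.join "" (lines.drop ((p :: idxs).getLastD 0))]
    = acc ++ pvF lines p idxs := by
  intro idxs
  induction idxs with
  | nil =>
    intro p acc
    rw [pvAwhile, dif_neg (by simp)]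
    simp [pvF]
  | cons j rest ih =>
    intro p acc
    rw [pvAwhile, dif_pos (by simp)]
    have e1 : ((p :: j :: rest).map (fun k : Nat => (k : Int))).getD (1 - 1) 0 = (p : Int) := by simp
    have e2 : ((p :: j :: rest).map (fun k : Nat => (k : Int))).getD 1 0 = (j : Int) := by simp
    rw [e1, e2, PySem.List.slice_natCast]
    have hs : pvAwhile lines ((p :: j :: rest).map (fun k : Nat => (k : Int))) (1 + 1)
          (acc ++ [PySem.Str.join "" ((lines.drop p).take (j - p))])
        = pvAwhile lines ((j :: rest).map (fun k : Nat => (k : Int))) 1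
          (acc ++ [PySem.Str.join "" ((lines.drop p).take (j - p))]) :=
      pvAwhile_shift lines _ _ (((j :: rest).map (fun k : Nat => (k : Int))).length) 1 _
        (by omega) (le_refl 1)
    rw [hs]
    have hl : (p :: j :: rest).getLastD 0 = (j :: rest).getLastD 0 := by simp
    rw [hl, ih j _]
    simp [pvF]

theorem pvBFold (ls : List String) : ∀ (acc cur : List String),
    pvFinish (ls.foldl pvBStep (acc, some cur)) = acc ++ pvGrp cur ls := by
  induction ls with
  | nil => intro acc cur; simp [pvFinish, pvGrp]
  | cons l ls ih =>
    intro acc cur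
    by_cases hm : pvMark l
    · rw [List.foldl_cons]
      have : pvBStep (acc, some cur) l = (acc ++ [PySem.Str.join "" cur], some [l]) := by
        simp [pvBStep, hm]
      rw [this, ih, pvGrp]
      simp [hm]
    · rw [List.foldl_cons]
      have : pvBStep (acc, some cur) l = (acc, some (cur ++ [l])) := by
        simp [pvBStep, hm]
      rw [this, ih, pvGrp]
      simp [hm]

theorem pvA_eq (lines : List String) (p : Nat) (rest : List Nat) (h : pvIdxs lines = p :: rest) :
    lines_to_projects lines = pvF lines p rest := by
  unfold lines_to_projects
  rw [pvIdxs_char lines 0, h]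
  have hcast : List.map (fun k : Nat => (0 : Int) + (k : Int)) (p :: rest)
      = List.map (fun k : Nat => (k : Int)) (p :: rest) := by
    refine List.map_congr_left fun k _ => by ring
  rw [hcast]
  simp only [PySem.List.pyGet?_neg_one]
  have hlast : ((p :: rest).map (fun k : Nat => (k : Int))).getLast?
      = some (((p :: rest).getLastD 0 : Nat) : Int) := by
    rw [List.getLast?_map]
    cases hrl : (p :: rest).getLast? with
    | none => simp at hrl
    | some v =>
      simp only [hrl, Option.map_some]
      congr 1
      rw [List.getLastD_eq_getLast?, hrl]
      rfl
  rw [hlast]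
  show pvAwhile lines ((p :: rest).map fun k : Nat => (k : Int)) 1 []
      ++ [PySem.Str.join "" (PySem.List.slice lines (some (((p :: rest).getLastD 0 : Nat) : Int)) none)]
    = pvF lines p rest
  rw [PySem.List.slice_from_natCast]
  have := pvBridge lines rest p []
  simpa using this

theorem pvMain (lines : List String) (h : ∃ l ∈ lines, pvMark l = true) :
    lines_to_projects lines = lines_to_projects_alt lines := by
  induction lines with
  | nil => simp at h
  | cons l ls ih =>
    by_cases hm : pvMark l
    · -- head is a marker: first group starts here
      have hidx : pvIdxs (l :: ls) = 0 :: (pvIdxs ls).map (· + 1) := by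
        simp [pvIdxs, hm]
      rw [pvA_eq (l :: ls) 0 _ hidx]
      have halt : lines_to_projects_alt (l :: ls) = pvFinish ((l :: ls).foldl pvBStep ([], none)) := rfl
      rw [halt, List.foldl_cons]
      have hstep : pvBStep ([], none) l = ([], some [l]) := by simp [pvBStep, hm]
      rw [hstep, pvBFold ls [] [l], List.nil_append]
      have := pvC (l :: ls) ls [l] 0 (by simp)
      rw [this]
      refine congrArg _ (List.map_congr_left fun k _ => ?_).symm
      simp
    · -- head is not a marker: both sides ignore it
      have hls : ∃ x ∈ ls, pvMark x = true := by
        obtain ⟨x, hx, hxm⟩ := h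
        rcases List.mem_cons.mp hx with rfl | hx
        · exact absurd hxm hm
        · exact ⟨x, hx, hxm⟩
      obtain ⟨p, rest, hpr⟩ : ∃ p rest, pvIdxs ls = p :: rest := by
        cases hi : pvIdxs ls with
        | nil =>
          obtain ⟨x, hx, hxm⟩ := hls
          rw [(pvIdxs_nil_iff ls).mp hi x hx] at hxm
          exact absurd hxm (by simp)
        | cons a b => exact ⟨a, b, rfl⟩
      have hidx : pvIdxs (l :: ls) = (p + 1) :: rest.map (· + 1) := by
        simp [pvIdxs, hm, hpr]
      rw [pvA_eq (l :: ls) (p + 1) _ hidx, pvF_shift, ← pvA_eq ls p rest hpr]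
      have halt : lines_to_projects_alt (l :: ls) = pvFinish ((l :: ls).foldl pvBStep ([], none)) := rfl
      rw [halt, List.foldl_cons]
      have hstep : pvBStep ([], none) l = ([], none) := by simp [pvBStep, hm]
      rw [hstep]
      exact ih hls


-- ===== VERDICT (by name: the statement is the Claim_ definition above) =====
theorem lines_to_projects_spec : Claim_equal_lines_to_projects := by
  intro lines _ hpre
  unfold Spec_lines_to_projects
  exact pvMain lines hpre
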